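-- pv_equiv track=rewrite | github.com/Jyoti-Ranjan-Das845/access-control | test.py | get_user_access_level
-- ===== SOURCE A (Python) =====
-- def get_user_access_level(groups):
--     if "Executive_Committee" in groups:
--         return "L3"
--     elif any(g.startswith("VP_") or g.startswith("Director_") for g in groups):
--         return "L2"
--     elif any(g.startswith("Manager_") for g in groups):
--         return "L1"
--     else:
--         return "L0"
-- ===== SOURCE B (Python) =====
-- def get_user_access_level(groups):
--     level = 0
--     for g in groups:
--         if g == "Executive_Committee":
--             k = 3
--         elif g.startswith("VP_") or g.startswith("Director_"):
--             k = 2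
--         elif g.startswith("Manager_"):
--             k = 1
--         else:
--             k = 0
--         if k > level:
--             level = k
--     return {3: "L3", 2: "L2", 1: "L1", 0: "L0"}[level]
-- ===== Notes on version B (the rewrite author's own statement) =====
-- stated objective: alternative
-- what changed: Replaces A's three separate short-circuiting scans (membership test plus two any() generator passes) with a single traversal that maintains a running maximum numeric level per group and decodes the max to a string at the end.
import Mathlib
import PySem

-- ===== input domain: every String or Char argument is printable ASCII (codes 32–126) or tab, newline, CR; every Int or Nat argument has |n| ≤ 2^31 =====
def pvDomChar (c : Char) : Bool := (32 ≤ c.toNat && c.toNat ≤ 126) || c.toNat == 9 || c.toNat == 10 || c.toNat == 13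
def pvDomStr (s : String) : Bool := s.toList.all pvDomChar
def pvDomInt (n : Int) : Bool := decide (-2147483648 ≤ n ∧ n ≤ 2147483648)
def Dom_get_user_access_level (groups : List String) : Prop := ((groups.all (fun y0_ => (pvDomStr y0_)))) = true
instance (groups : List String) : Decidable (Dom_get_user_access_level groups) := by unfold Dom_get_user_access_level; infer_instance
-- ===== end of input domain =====

-- B replaces A's three short-circuiting scans with one max-accumulating pass; objective: alternative.

-- ===== PORT A =====
def get_user_access_level (groups : List String) : String :=
  if groups.contains "Executive_Committee" then "L3"
  else if groups.any (fun g => PySem.Str.startswith g "VP_" || PySem.Str.startswith g "Director_") then "L2"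
  else if groups.any (fun g => PySem.Str.startswith g "Manager_") then "L1"
  else "L0"

-- ===== PORT B =====
def pvLevel (g : String) : Nat :=
  if g = "Executive_Committee" then 3
  else if PySem.Str.startswith g "VP_" || PySem.Str.startswith g "Director_" then 2
  else if PySem.Str.startswith g "Manager_" then 1
  else 0

def pvDecode (n : Nat) : String :=
  if n = 3 then "L3" else if n = 2 then "L2" else if n = 1 then "L1" else "L0"

def get_user_access_level_alt (groups : List String) : String :=
  pvDecode (groups.foldl (fun m g => let k := pvLevel g; if k > m then k else m) 0)

-- ===== PRECONDITION & SPEC =====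
def Spec_get_user_access_level (groups : List String) (out : String) : Prop := out = get_user_access_level_alt groups
instance (groups : List String) (out : String) : Decidable (Spec_get_user_access_level groups out) := by unfold Spec_get_user_access_level; infer_instance

-- ===== CLAIM (what is proved, stated in full; the proofs are below) =====
def Claim_equal_get_user_access_level : Prop := ∀ (groups : List String), Dom_get_user_access_level groups → Spec_get_user_access_level groups (get_user_access_level groups)

-- ===== LEMMAS AND PROOFS =====

theorem pvStep_eq_max (m : Nat) (g : String) :
    (let k := pvLevel g; if k > m then k else m) = max m (pvLevel g) := by
  simp only [Nat.max_def]
  split_ifs <;> omega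

theorem pvFold_max (gs : List String) : ∀ (a b : Nat),
    gs.foldl (fun m g => max m (pvLevel g)) (max a b)
      = max a (gs.foldl (fun m g => max m (pvLevel g)) b) := by
  induction gs with
  | nil => intro a b; rfl
  | cons g gs ih =>
      intro a b
      simp only [List.foldl_cons]
      rw [Nat.max_assoc]
      exact ih a _

theorem pvFold_char (gs : List String) :
    gs.foldl (fun m g => let k := pvLevel g; if k > m then k else m) 0
      = (if gs.contains "Executive_Committee" then 3
         else if gs.any (fun g => PySem.Str.startswith g "VP_" || PySem.Str.startswith g "Director_") then 2
         else if gs.any (fun g => PySem.Str.startswith g "Manager_") then 1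
         else 0) := by
  induction gs with
  | nil => rfl
  | cons g gs ih =>
      simp only [List.foldl_cons, pvStep_eq_max, Nat.max_comm 0 (pvLevel g)] at *
      rw [pvFold_max gs (pvLevel g) 0, ih]
      clear ih
      simp only [List.contains_cons, List.any_cons, pvLevel]
      obtain ⟨c3, hc3⟩ : ∃ b, gs.contains "Executive_Committee" = b := ⟨_, rfl⟩
      obtain ⟨c2, hc2⟩ : ∃ b, (gs.any fun g => PySem.Str.startswith g "VP_" || PySem.Str.startswith g "Director_") = b := ⟨_, rfl⟩
      obtain ⟨c1, hc1⟩ : ∃ b, (gs.any fun g => PySem.Str.startswith g "Manager_") = b := ⟨_, rfl⟩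
      simp only [hc3, hc2, hc1]
      by_cases h3 : g = "Executive_Committee"
      · subst h3
        cases c3 <;> cases c2 <;> cases c1 <;> decide
      · have h3' : ("Executive_Committee" == g) = false := by
          simp [Ne.symm h3]
        by_cases h2 : (PySem.Str.startswith g "VP_" || PySem.Str.startswith g "Director_") = true <;>
        by_cases h1 : PySem.Str.startswith g "Manager_" = true <;>
        cases c3 <;> cases c2 <;> cases c1 <;>
        simp_all

theorem get_user_access_level_spec : Claim_equal_get_user_access_level := by
  intro groups _
  unfold Spec_get_user_access_level get_user_access_level get_user_access_level_alt pvDecode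
  rw [pvFold_char]
  split_ifs <;> simp_all
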